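-- pv_equiv track=rewrite | github.com/MrBrantCode/unitest_baseline | mut_generate/mist_train_cf/cf_4792/solution.py | concatenate_strings
-- ===== SOURCE A (Python) =====
-- def concatenate_strings(input_list):
--     result = []
--     total_len = sum(len(s) for s in input_list)
--     for i in range(len(input_list)):
--         concatenated = ""
--         for j in range(len(input_list)):
--             if i != j:
--                 concatenated += input_list[j]
--         result.append(concatenated)
--     return result
-- ===== SOURCE B (Python) =====
-- def concatenate_strings(input_list):
--     n = len(input_list)
--     prefix = [""] * (n + 1)
--     for i in range(n):
--         prefix[i + 1] = prefix[i] + input_list[i]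
--     suffix = [""] * (n + 1)
--     for i in range(n - 1, -1, -1):
--         suffix[i] = input_list[i] + suffix[i + 1]
--     return [prefix[i] + suffix[i + 1] for i in range(n)]
-- ===== Notes on version B (the rewrite author's own statement) =====
-- stated objective: faster
-- what changed: Replaced the nested loop that re-concatenates all other strings for every index with prefix/suffix concatenation arrays (result[i] = prefix[i] + suffix[i+1]); intended as faster (O(n*L) vs O(n^2*L) work), measured 6.35x at the largest size both finished (n=4096).
import Mathlib
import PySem

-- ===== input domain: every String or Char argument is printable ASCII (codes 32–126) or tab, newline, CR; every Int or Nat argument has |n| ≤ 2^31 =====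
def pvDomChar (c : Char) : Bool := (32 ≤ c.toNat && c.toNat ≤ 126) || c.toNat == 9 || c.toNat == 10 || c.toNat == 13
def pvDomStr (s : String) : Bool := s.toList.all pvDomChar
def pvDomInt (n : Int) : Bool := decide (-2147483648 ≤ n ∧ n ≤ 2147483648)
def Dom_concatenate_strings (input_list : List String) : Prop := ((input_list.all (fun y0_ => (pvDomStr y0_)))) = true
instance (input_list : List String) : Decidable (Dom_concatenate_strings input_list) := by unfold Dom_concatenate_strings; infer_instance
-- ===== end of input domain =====

-- B replaces A's quadratic per-index re-concatenation with prefix/suffix concatenation arrays; intended as faster (measured 6.35x at n=4096, the largest size both finished).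

-- ===== PORT A =====
-- literal transliteration: outer loop over indices, inner loop skipping j = i, string accumulator
def concatenate_strings (input_list : List String) : List String :=
  let _total_len := (input_list.map String.length).sum
  (List.range input_list.length).foldl
    (fun result i =>
      result ++
        [(List.range input_list.length).foldl
          (fun concatenated j =>
            if i ≠ j then concatenated ++ input_list.getD j "" else concatenated) ""])
    []

-- ===== PORT B =====
-- prefix[k] = concatenation of the first k strings (B's forward loop)
def pvPrefixes (acc : String) : List String → List String
  | [] => [acc]
  | s :: rest => acc :: pvPrefixes (acc ++ s) rest

-- suffix[k] = concatenation of the strings from index k on (B's backward loop)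
def pvSuffixes : List String → List String
  | [] => [""]
  | s :: rest =>
    let t := pvSuffixes rest
    (s ++ t.headI) :: t

def concatenate_strings_alt (input_list : List String) : List String :=
  List.zipWith (fun a b => a ++ b) (pvPrefixes "" input_list) (pvSuffixes input_list).tail

-- ===== PRECONDITION & SPEC =====
def Spec_concatenate_strings (input_list : List String) (out : List String) : Prop := out = concatenate_strings_alt input_list
instance (input_list : List String) (out : List String) : Decidable (Spec_concatenate_strings input_list out) := by unfold Spec_concatenate_strings; infer_instance

-- ===== CLAIM (what is proved, stated in full; the proofs are below) =====
def Claim_equal_concatenate_strings : Prop := ∀ (input_list : List String), Dom_concatenate_strings input_list → Spec_concatenate_strings input_list (concatenate_strings input_list)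

-- ===== LEMMAS AND PROOFS =====

def pvJoin : List String → String
  | [] => ""
  | s :: rest => s ++ pvJoin rest

-- concatenation of all elements except the one at index i
def pvStrip (l : List String) (i : Nat) : String := pvJoin (l.take i ++ l.drop (i + 1))

theorem pvStrip_zero (s : String) (rest : List String) : pvStrip (s :: rest) 0 = pvJoin rest := by
  simp [pvStrip]

theorem pvStrip_succ (s : String) (rest : List String) (i : Nat) :
    pvStrip (s :: rest) (i + 1) = s ++ pvStrip rest i := by
  simp [pvStrip, pvJoin]

theorem fold_all (l : List String) (acc : String) :
    (List.range l.length).foldl (fun c j => c ++ l.getD j "") acc = acc ++ pvJoin l := by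
  induction l generalizing acc with
  | nil => simp [pvJoin]
  | cons s rest ih =>
    simp only [List.length_cons, List.range_succ_eq_map, List.foldl_cons, List.foldl_map,
      List.getD_cons_zero, List.getD_cons_succ]
    rw [ih, pvJoin, String.append_assoc]

theorem inner_fold (l : List String) (i : Nat) (acc : String) :
    (List.range l.length).foldl
      (fun c j => if i ≠ j then c ++ l.getD j "" else c) acc = acc ++ pvStrip l i := by
  induction l generalizing i acc with
  | nil => simp [pvStrip, pvJoin]
  | cons s rest ih =>
    simp only [List.length_cons, List.range_succ_eq_map, List.foldl_cons, List.foldl_map,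
      List.getD_cons_zero, List.getD_cons_succ]
    cases i with
    | zero =>
      simp only [ne_eq, not_true_eq_false, if_false]
      rw [show (fun (x : String) (y : Nat) => if ¬(0 : Nat) = y.succ then x ++ rest.getD y "" else x)
            = (fun c j => c ++ rest.getD j "") by
            funext c j; simp]
      rw [fold_all, pvStrip_zero]
    | succ i' =>
      simp only [ne_eq, Nat.succ_ne_zero, not_false_eq_true, if_true]
      rw [show (fun c j => if ¬ i' + 1 = j + 1 then c ++ rest.getD j "" else c)
            = (fun c j => if i' ≠ j then c ++ rest.getD j "" else c) by
            funext c j; by_cases h : i' = j <;> simp [h]]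
      rw [ih, pvStrip_succ, String.append_assoc]

theorem outer_fold (n : Nat) (g : Nat → String) (acc : List String) :
    (List.range n).foldl (fun r i => r ++ [g i]) acc = acc ++ (List.range n).map g := by
  induction n generalizing acc with
  | zero => simp
  | succ m ih => rw [List.range_succ, List.foldl_append]; simp [ih]

theorem a_eq_map (l : List String) :
    concatenate_strings l = (List.range l.length).map (pvStrip l) := by
  unfold concatenate_strings
  rw [outer_fold]
  simp only [List.nil_append]
  apply List.map_congr_left
  intro i _
  rw [inner_fold, String.empty_append]

theorem suffixes_headI (l : List String) : (pvSuffixes l).headI = pvJoin l := by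
  induction l with
  | nil => simp [pvSuffixes, pvJoin]
  | cons s rest ih => simp [pvSuffixes, pvJoin, ih]

theorem suffixes_cons (l : List String) : pvSuffixes l = pvJoin l :: (pvSuffixes l).tail := by
  cases l with
  | nil => simp [pvSuffixes, pvJoin]
  | cons s rest => simp [pvSuffixes, pvJoin, suffixes_headI]

theorem b_eq_map (l : List String) (acc : String) :
    List.zipWith (fun a b => a ++ b) (pvPrefixes acc l) (pvSuffixes l).tail
      = (List.range l.length).map (fun i => acc ++ pvStrip l i) := by
  induction l generalizing acc with
  | nil => simp [pvPrefixes, pvSuffixes]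
  | cons s rest ih =>
    show List.zipWith _ (acc :: pvPrefixes (acc ++ s) rest) (pvSuffixes rest) = _
    rw [suffixes_cons rest]
    simp only [List.zipWith_cons_cons, List.length_cons, List.range_succ_eq_map,
      List.map_cons, List.map_map]
    congr 1
    rw [ih]
    apply List.map_congr_left
    intro i _
    simp [Function.comp, pvStrip_succ, String.append_assoc]

-- ===== VERDICT (by name: the statement is the Claim_ definition above) =====
theorem concatenate_strings_spec : Claim_equal_concatenate_strings := by
  intro l _
  unfold Spec_concatenate_strings concatenate_strings_alt
  rw [a_eq_map, b_eq_map]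
  apply List.map_congr_left
  intro i _
  rw [String.empty_append]
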